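-- pv_equiv track=rewrite | github.com/sileod/reasoning_core | reasoning_core/tasks/code_program_synthesis.py | _matches_outer
-- ===== SOURCE A (Python) =====
-- def _matches_outer(s: str) -> bool:
--     """Check that s[0]='(' matches s[-1]=')' as the outermost pair."""
--     if not (s.startswith('(') and s.endswith(')')): return False
--     depth, in_str = 0, False
--     for i, ch in enumerate(s):
--         if ch == '"': in_str = not in_str
--         elif not in_str:
--             if ch == '(': depth += 1
--             elif ch == ')':
--                 depth -= 1
--                 if depth == 0: return i == len(s) - 1
--     return False
-- ===== SOURCE B (Python) =====
-- def _matches_outer(s: str) -> bool: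
--     """Check that s[0]='(' matches s[-1]=')' as the outermost pair."""
--     if not (s.startswith('(') and s.endswith(')')): return False
--     # phase 1: record each paren outside string literals as (original index, is_open)
--     recs, q = [], 0
--     for i, ch in enumerate(s):
--         if ch == '"':
--             q ^= 1
--         elif q == 0 and ch in '()':
--             recs.append((i, ch == '('))
--     # phase 2: walk the records tracking depth; first close reaching depth 0 decides
--     depth = 0
--     for i, is_open in recs:
--         depth += 1 if is_open else -1
--         if depth == 0 and not is_open:
--             return i == len(s) - 1
--     return False
-- ===== Notes on version B (the rewrite author's own statement) =====
-- stated objective: alternative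
-- what changed: B splits A's single fused scan into two phases: a first pass collects the significant parentheses (original index, is_open) outside string literals, and a second pass over those records tracks depth and decides the answer; A interleaves string-skipping, depth counting and the decision in one loop.
import Mathlib
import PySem

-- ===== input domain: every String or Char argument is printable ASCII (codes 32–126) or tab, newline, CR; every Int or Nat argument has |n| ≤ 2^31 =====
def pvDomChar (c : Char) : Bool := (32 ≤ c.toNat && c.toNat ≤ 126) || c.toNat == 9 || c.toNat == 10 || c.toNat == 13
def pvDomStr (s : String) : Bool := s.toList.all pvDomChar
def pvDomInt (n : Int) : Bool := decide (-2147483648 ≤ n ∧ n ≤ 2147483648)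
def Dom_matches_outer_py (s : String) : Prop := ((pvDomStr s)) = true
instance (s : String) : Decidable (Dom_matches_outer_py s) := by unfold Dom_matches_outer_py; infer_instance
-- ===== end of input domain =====

-- B performs the same check as A but in two phases (collect significant parens, then scan them); same O(n) cost, different decomposition.

-- ===== PORT A =====
-- A's single fused loop over the enumerated characters.
def pvALoop : List Char → Int → Bool → Nat → Nat → Bool
  | [], _, _, _, _ => false
  | c :: cs, depth, instr, i, n =>
    if c = '"' then pvALoop cs depth (!instr) (i+1) n
    else if !instr then
      if c = '(' then pvALoop cs (depth+1) instr (i+1) n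
      else if c = ')' then
        if depth - 1 = 0 then decide (i = n - 1)
        else pvALoop cs (depth-1) instr (i+1) n
      else pvALoop cs depth instr (i+1) n
    else pvALoop cs depth instr (i+1) n

def matches_outer_py (s : String) : Bool :=
  if !(PySem.Str.startswith s "(" && PySem.Str.endswith s ")") then false
  else pvALoop s.toList 0 false 0 s.toList.length

-- ===== PORT B =====
-- Phase 1: record each paren outside string literals as (original index, is_open); q is quote parity.
def pvCollect : List Char → Nat → Nat → List (Nat × Bool)
  | [], _, _ => []
  | c :: cs, q, i =>
    if c = '"' then pvCollect cs (q ^^^ 1) (i+1)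
    else if q = 0 && (c = '(' || c = ')') then (i, c = '(') :: pvCollect cs q (i+1)
    else pvCollect cs q (i+1)

-- Phase 2: walk the records tracking depth; the first close reaching depth 0 decides.
def pvScan : List (Nat × Bool) → Int → Nat → Bool
  | [], _, _ => false
  | (i, op) :: rest, depth, n =>
    let d := depth + (if op then 1 else -1)
    if d = 0 && !op then decide (i = n - 1)
    else pvScan rest d n

def matches_outer_py_alt (s : String) : Bool :=
  if !(PySem.Str.startswith s "(" && PySem.Str.endswith s ")") then false
  else pvScan (pvCollect s.toList 0 0) 0 s.toList.length

-- ===== PRECONDITION & SPEC =====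
def Spec_matches_outer_py (s : String) (out : Bool) : Prop := out = matches_outer_py_alt s
instance (s : String) (out : Bool) : Decidable (Spec_matches_outer_py s out) := by unfold Spec_matches_outer_py; infer_instance

-- ===== CLAIM (what is proved, stated in full; the proofs are below) =====
def Claim_equal_matches_outer_py : Prop := ∀ (s : String), Dom_matches_outer_py s → Spec_matches_outer_py s (matches_outer_py s)

-- ===== LEMMAS AND PROOFS =====
theorem pvALoop_eq_scan_collect (cs : List Char) :
    ∀ (depth : Int) (instr : Bool) (i n : Nat),
      pvALoop cs depth instr i n = pvScan (pvCollect cs (if instr then 1 else 0) i) depth n := by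
  induction cs with
  | nil => intro depth instr i n; simp [pvALoop, pvCollect, pvScan]
  | cons c cs ih =>
    intro depth instr i n
    by_cases hq : c = '"'
    · cases instr <;> simp [pvALoop, pvCollect, hq, ih]
    · cases instr with
      | true => simp [pvALoop, pvCollect, hq, ih]
      | false =>
        by_cases ho : c = '('
        · simp [pvALoop, pvCollect, pvScan, ho, ih]
        · by_cases hc : c = ')'
          · simp [pvALoop, pvCollect, pvScan, hc, ih, sub_eq_add_neg]
          · simp [pvALoop, pvCollect, hq, ho, hc, ih]

-- ===== VERDICT (by name: the statement is the Claim_ definition above) =====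
theorem matches_outer_py_spec : Claim_equal_matches_outer_py := by
  intro s _
  unfold Spec_matches_outer_py matches_outer_py matches_outer_py_alt
  simp [pvALoop_eq_scan_collect]
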